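-- pv_equiv track=rewrite | github.com/Viknesh-Rajaramon/Leetcode-Problems | Algorithms/Hard/2147_Number_of_Ways_to_Divide_a_Long_Corridor/Python3.py | numberOfWays
-- ===== SOURCE A (Python) =====
-- def numberOfWays(corridor: str) -> int:
--     mod, zero, one, two = 10**9+7, 0, 0, 1
--     for c in corridor:
--         if c == "S":
--             zero = one
--             one, two = two, one
--         else:
--             two = (two + zero) % mod
--
--     return zero
-- ===== SOURCE B (Python) =====
-- def numberOfWays(corridor: str) -> int:
--     MOD = 10**9 + 7
--     seats = [i for i, c in enumerate(corridor) if c == 'S']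
--     if not seats or len(seats) % 2:
--         return 0
--     res = 1
--     for i in range(1, len(seats) // 2):
--         res = res * (seats[2 * i] - seats[2 * i - 1]) % MOD
--     return res
-- ===== Notes on version B (the rewrite author's own statement) =====
-- stated objective: alternative
-- what changed: Replaces the 3-state rolling DP over every character with collecting the seat indices once and multiplying the gaps between consecutive seat pairs (seats[2i]-seats[2i-1]) mod 1e9+7.
import Mathlib
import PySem

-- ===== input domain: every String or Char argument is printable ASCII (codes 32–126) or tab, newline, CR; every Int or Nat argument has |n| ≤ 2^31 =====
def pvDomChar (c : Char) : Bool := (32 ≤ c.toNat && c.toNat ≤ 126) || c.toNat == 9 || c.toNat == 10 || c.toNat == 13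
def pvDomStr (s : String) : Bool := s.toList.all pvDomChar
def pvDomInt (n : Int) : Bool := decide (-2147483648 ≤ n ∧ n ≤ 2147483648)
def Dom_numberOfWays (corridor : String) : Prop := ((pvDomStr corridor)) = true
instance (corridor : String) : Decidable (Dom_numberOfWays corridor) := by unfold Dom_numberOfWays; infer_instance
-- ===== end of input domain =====

-- B replaces A's 3-state rolling DP by a seat-index table and a product of consecutive pair gaps (alternative algorithm, same cost).

-- ===== PORT A =====
def pvStepA (st : Int × Int × Int) (c : Char) : Int × Int × Int :=
  if c = 'S' then (st.2.1, st.2.2, st.2.1)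
  else (st.1, st.2.1, PySem.Int.mod (st.2.2 + st.1) 1000000007)

def numberOfWays (corridor : String) : Int :=
  (corridor.toList.foldl pvStepA (0, 0, 1)).1

-- ===== PORT B =====
def numberOfWays_alt (corridor : String) : Int :=
  let seats : List Int :=
    ((PySem.List.enumerate corridor.toList).filter (fun p => p.2 == 'S')).map (fun p => p.1)
  if seats = [] ∨ PySem.Int.mod (seats.length : Int) 2 ≠ 0 then 0
  else
    (PySem.List.pyRange 1 (PySem.Int.floordiv (seats.length : Int) 2) 1).foldl
      (fun r i =>
        PySem.Int.mod
          (r * (PySem.List.pyGetD seats (2 * i) 0 - PySem.List.pyGetD seats (2 * i - 1) 0))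
          1000000007) 1

-- ===== PRECONDITION & SPEC =====
def Spec_numberOfWays (corridor : String) (out : Int) : Prop := out = numberOfWays_alt corridor
instance (corridor : String) (out : Int) : Decidable (Spec_numberOfWays corridor out) := by unfold Spec_numberOfWays; infer_instance

-- ===== CLAIM (what is proved, stated in full; the proofs are below) =====
def Claim_equal_numberOfWays : Prop := ∀ (corridor : String), Dom_numberOfWays corridor → Spec_numberOfWays corridor (numberOfWays corridor)

-- ===== LEMMAS AND PROOFS =====

def pvM : Int := 1000000007

def pvProdPairs : List Int → Int → Int
  | a :: b :: t, r => pvProdPairs t (PySem.Int.mod (r * (b - a)) pvM)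
  | _, r => r

def pvPosS : List Char → List Int
  | [] => []
  | c :: cs => if c = 'S' then 0 :: (pvPosS cs).map (· + 1) else (pvPosS cs).map (· + 1)

mutual
def pvSodd : List Char → Int → Int
  | [], _ => 0
  | c :: cs, P => if c = 'S' then pvSeven cs P 1 else pvSodd cs P
def pvSeven : List Char → Int → Int → Int
  | [], P, _ => P
  | c :: cs, P, k => if c = 'S' then pvSodd cs (PySem.Int.mod (P * k) pvM) else pvSeven cs P (k + 1)
end

def pvSzero : List Char → Int
  | [] => 0
  | c :: cs => if c = 'S' then pvSodd cs 1 else pvSzero cs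

theorem pvProdPairs_map_add (d : Int) (xs : List Int) (r : Int) :
    pvProdPairs (xs.map (· + d)) r = pvProdPairs xs r := by
  induction xs, r using pvProdPairs.induct with
  | case1 a b t r ih => simp [pvProdPairs, ih]
  | case2 l r h =>
    cases l with
    | nil => simp [pvProdPairs]
    | cons a t =>
      cases t with
      | nil => simp [pvProdPairs]
      | cons b t2 => exact absurd rfl (h a b t2)

theorem pvProdPairs_short (l : List Int) (r : Int) (h : l.length ≤ 1) : pvProdPairs l r = r := by
  cases l with
  | nil => simp [pvProdPairs]
  | cons a t =>
    cases t with
    | nil => simp [pvProdPairs]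
    | cons b t2 => simp at h

theorem pvModM_self (P : Int) (h0 : 0 ≤ P) (h1 : P < pvM) : PySem.Int.mod P pvM = P := by
  rw [PySem.Int.mod_eq_emod_of_pos (by norm_num [pvM])]; exact Int.emod_eq_of_lt h0 h1

theorem pvA_states (cs : List Char) :
    (cs.foldl pvStepA (0, 0, 1)).1 = pvSzero cs
    ∧ (∀ P : Int, 0 ≤ P → P < pvM → (cs.foldl pvStepA (0, P, 0)).1 = pvSodd cs P)
    ∧ (∀ P k : Int, 0 ≤ P → P < pvM →
        (cs.foldl pvStepA (P, 0, PySem.Int.mod (P * k) pvM)).1 = pvSeven cs P k) := by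
  induction cs with
  | nil => refine ⟨rfl, fun P _ _ => rfl, fun P k _ _ => rfl⟩
  | cons c cs ih =>
    obtain ⟨ih0, ihodd, iheven⟩ := ih
    by_cases hc : c = 'S'
    · refine ⟨?_, fun P hP0 hP1 => ?_, fun P k hP0 hP1 => ?_⟩
      · -- zero state, 'S': new state (0,1,0) = odd with P=1
        simp only [List.foldl_cons, pvStepA, hc, if_pos rfl, pvSzero]
        exact ihodd 1 (by norm_num) (by norm_num [pvM])
      · -- odd state, 'S': new state (P,0,P) = even with k=1
        simp only [List.foldl_cons, pvStepA, hc, if_pos rfl, pvSodd]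
        have h : (P : Int) = PySem.Int.mod (P * 1) pvM := by
          rw [mul_one, pvModM_self P hP0 hP1]
        rw [show ((P, (0:Int), P) : Int × Int × Int) = (P, 0, PySem.Int.mod (P * 1) pvM) by rw [← h]]
        exact iheven P 1 hP0 hP1
      · -- even state, 'S': new state (0, T, 0) = odd with P' = mod (P*k) pvM
        simp only [List.foldl_cons, pvStepA, hc, if_pos rfl, pvSeven]
        exact ihodd _ (PySem.Int.mod_nonneg _ (by norm_num [pvM]))
          (PySem.Int.mod_lt _ (by norm_num [pvM]))
    · refine ⟨?_, fun P hP0 hP1 => ?_, fun P k hP0 hP1 => ?_⟩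
      · simp only [List.foldl_cons, pvStepA, hc, if_neg hc, pvSzero]
        have : PySem.Int.mod ((1:Int) + 0) 1000000007 = 1 := by decide
        rw [this]; exact ih0
      · simp only [List.foldl_cons, pvStepA, hc, if_neg hc, pvSodd]
        have : PySem.Int.mod ((0:Int) + 0) 1000000007 = 0 := by decide
        rw [this]; exact ihodd P hP0 hP1
      · simp only [List.foldl_cons, pvStepA, hc, if_neg hc, pvSeven]
        have : PySem.Int.mod (PySem.Int.mod (P * k) pvM + P) 1000000007
            = PySem.Int.mod (P * (k + 1)) pvM := by
          rw [PySem.Int.mod_eq_emod_of_pos (b := pvM) (by norm_num [pvM]),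
              PySem.Int.mod_eq_emod_of_pos (by norm_num [pvM]),
              PySem.Int.mod_eq_emod_of_pos (by norm_num [pvM])]
          show (P * k % pvM + P) % (1000000007 : Int) = P * (k + 1) % pvM
          rw [show ((1000000007:Int)) = pvM from rfl, Int.emod_add_emod]
          ring_nf
        rw [this]; exact iheven P (k + 1) hP0 hP1

theorem pvL2 (cs : List Char) :
    (∀ P : Int, pvSodd cs P =
      if (pvPosS cs).length % 2 = 1 then pvProdPairs (pvPosS cs) P else 0)
    ∧ (∀ P k : Int, pvSeven cs P k =
      if (pvPosS cs).length % 2 = 0 then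
        (match pvPosS cs with
          | [] => P
          | q :: rest => pvProdPairs rest (PySem.Int.mod (P * (k + q)) pvM))
      else 0) := by
  induction cs with
  | nil =>
    refine ⟨fun P => by simp [pvSodd, pvPosS], fun P k => by simp [pvSeven, pvPosS, pvProdPairs]⟩
  | cons c cs ih =>
    obtain ⟨ihodd, iheven⟩ := ih
    by_cases hc : c = 'S'
    · refine ⟨fun P => ?_, fun P k => ?_⟩
      ·
        rw [show pvSodd (c :: cs) P = pvSeven cs P 1 by simp [pvSodd, hc]]
        rw [iheven P 1]
        simp only [pvPosS, hc, if_pos rfl]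
        cases hps : pvPosS cs with
        | nil => simp [hps, pvProdPairs]
        | cons q rest =>
          simp only [hps, List.length_cons, List.map_cons, List.length_map]
          by_cases hpar : rest.length % 2 = 1
          · simp [hpar, Nat.add_mod, pvProdPairs, pvProdPairs_map_add]
            ring_nf
          · simp [hpar, Nat.add_mod]
            omega
      · rw [show pvSeven (c :: cs) P k = pvSodd cs (PySem.Int.mod (P * k) pvM) by simp [pvSeven, hc]]
        rw [ihodd]
        simp only [pvPosS, hc, if_pos rfl, List.length_cons, List.length_map]
        by_cases hpar : (pvPosS cs).length % 2 = 1
        · simp [hpar, Nat.add_mod, pvProdPairs_map_add]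
        · simp [hpar, Nat.add_mod]
          omega
    · refine ⟨fun P => ?_, fun P k => ?_⟩
      ·
        rw [show pvSodd (c :: cs) P = pvSodd cs P by simp [pvSodd, hc]]
        rw [ihodd]
        simp [pvPosS, hc, pvProdPairs_map_add]
      · rw [show pvSeven (c :: cs) P k = pvSeven cs P (k+1) by simp [pvSeven, hc]]
        rw [iheven]
        simp only [pvPosS, hc, if_neg hc, List.length_map]
        by_cases hpar : (pvPosS cs).length % 2 = 0
        · simp only [hpar, if_pos rfl]
          cases hps : pvPosS cs with
          | nil => simp
          | cons q rest =>
            rw [hps] at hpar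
            simp only [List.length_cons] at hpar
            simp [pvProdPairs_map_add, Nat.add_mod, hpar]
            ring_nf
        · simp [hpar]

theorem pvL3 (cs : List Char) :
    pvSzero cs =
      if pvPosS cs = [] ∨ (pvPosS cs).length % 2 = 1 then 0
      else pvProdPairs (pvPosS cs).tail 1 := by
  induction cs with
  | nil => simp [pvSzero, pvPosS]
  | cons c cs ih =>
    by_cases hc : c = 'S'
    · rw [show pvSzero (c :: cs) = pvSodd cs 1 by simp [pvSzero, hc]]
      rw [(pvL2 cs).1]
      simp only [pvPosS, hc, if_pos rfl, List.length_cons, List.length_map, List.tail_cons]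
      by_cases hpar : (pvPosS cs).length % 2 = 1
      · simp [hpar, Nat.add_mod, pvProdPairs_map_add]
      · simp [hpar, Nat.add_mod]
        omega
    · rw [show pvSzero (c :: cs) = pvSzero cs by simp [pvSzero, hc]]
      rw [ih]
      simp only [pvPosS, hc, if_neg hc]
      rcases hps : pvPosS cs with _ | ⟨q, rest⟩
      · simp
      · simp [pvProdPairs_map_add, List.tail_cons]

theorem pvSeats_eq (cs : List Char) (s : Int) :
    ((PySem.List.enumerate cs s).filter (fun p => p.2 == 'S')).map (fun p => p.1)
      = (pvPosS cs).map (· + s) := by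
  induction cs generalizing s with
  | nil => simp [PySem.List.enumerate_nil, pvPosS]
  | cons c cs ih =>
    rw [PySem.List.enumerate_cons]
    by_cases hc : c = 'S'
    · simp only [List.filter_cons, hc, List.map_cons, pvPosS, if_pos rfl]
      simp only [show (('S' == 'S') = true) from rfl, if_pos rfl]
      simp [ih, List.map_map]
      intro a _; ring
    · simp only [List.filter_cons, pvPosS, if_neg hc]
      have hb : ((c == 'S') = false) := by simp [hc]
      simp [hb, ih, List.map_map]
      intro a _; ring

theorem pvRangeFold (xs : List Int) (p : Nat) (hlen : xs.length = 2 * p) :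
    ∀ (n j : Nat) (r : Int), 1 ≤ j → p - j ≤ n →
      (PySem.List.pyRange (j : Int) (p : Int) 1).foldl
        (fun r i =>
          PySem.Int.mod
            (r * (PySem.List.pyGetD xs (2 * i) 0 - PySem.List.pyGetD xs (2 * i - 1) 0)) 1000000007)
        r
      = pvProdPairs (xs.drop (2 * j - 1)) r := by
  intro n
  induction n with
  | zero =>
    intro j r hj hn
    have hjp : p ≤ j := by omega
    rw [PySem.List.pyRange_one_eq_nil (by exact_mod_cast hjp)]
    rw [pvProdPairs_short _ _ (by simp [hlen]; omega)]
    rfl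
  | succ n ihn =>
    intro j r hj hn
    by_cases hjp : p ≤ j
    · rw [PySem.List.pyRange_one_eq_nil (by exact_mod_cast hjp)]
      rw [pvProdPairs_short _ _ (by simp [hlen]; omega)]
      rfl
    · have hjlt : j < p := by omega
      rw [PySem.List.pyRange_one_cons (by exact_mod_cast hjlt)]
      rw [List.foldl_cons]
      have h2j : 2 * j < xs.length := by omega
      have h2j1 : 2 * j - 1 < xs.length := by omega
      have e1 : (2 * (j : Int)) = ((2 * j : Nat) : Int) := by push_cast; ring
      have e2 : (2 * (j : Int) - 1) = ((2 * j - 1 : Nat) : Int) := by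
        have : (1:Nat) ≤ 2 * j := by omega
        push_cast [this]; ring
      rw [e2, e1, PySem.List.pyGetD_natCast, PySem.List.pyGetD_natCast,
          List.getD_eq_getElem xs 0 h2j, List.getD_eq_getElem xs 0 h2j1]
      have hd : xs.drop (2 * j - 1) = xs[2 * j - 1] :: xs[2 * j] :: xs.drop (2 * j + 1) := by
        rw [List.drop_eq_getElem_cons h2j1]
        congr 1
        have : 2 * j - 1 + 1 = 2 * j := by omega
        rw [this, List.drop_eq_getElem_cons h2j]
      rw [hd]
      show _ = pvProdPairs _ _
      rw [show pvProdPairs (xs[2 * j - 1] :: xs[2 * j] :: xs.drop (2 * j + 1)) r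
            = pvProdPairs (xs.drop (2 * j + 1))
                (PySem.Int.mod (r * (xs[2 * j] - xs[2 * j - 1])) pvM) from rfl]
      have e3 : ((j : Int) + 1) = ((j + 1 : Nat) : Int) := by push_cast; ring
      rw [e3]
      have := ihn (j + 1) (PySem.Int.mod (r * (xs[2 * j] - xs[2 * j - 1])) pvM) (by omega) (by omega)
      simp only [pvM] at this ⊢
      rw [this]
      congr 2

theorem numberOfWays_agree (corridor : String) : numberOfWays corridor = numberOfWays_alt corridor := by
  unfold numberOfWays numberOfWays_alt
  rw [(pvA_states corridor.toList).1, pvL3 corridor.toList]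
  have hseats : ((PySem.List.enumerate corridor.toList).filter (fun p => p.2 == 'S')).map
      (fun p => p.1) = pvPosS corridor.toList := by
    rw [pvSeats_eq corridor.toList 0]; simp
  simp only [hseats]
  set xs := pvPosS corridor.toList with hxs
  have hmod : PySem.Int.mod (xs.length : Int) 2 = ((xs.length % 2 : Nat) : Int) := by
    rw [PySem.Int.mod_eq_emod_of_pos (by norm_num)]; omega
  by_cases hcond : xs = [] ∨ xs.length % 2 = 1
  · have h2 : xs = [] ∨ PySem.Int.mod (xs.length : Int) 2 ≠ 0 := by
      rcases hcond with h | h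
      · left; exact h
      · right; rw [hmod, h]; norm_num
    rw [if_pos hcond, if_pos h2]
  · push_neg at hcond
    obtain ⟨hne, hpar⟩ := hcond
    have hA : ¬(xs = [] ∨ xs.length % 2 = 1) := by push_neg; exact ⟨hne, hpar⟩
    have hB : ¬(xs = [] ∨ PySem.Int.mod (xs.length : Int) 2 ≠ 0) := by
      push_neg
      refine ⟨hne, ?_⟩
      rw [hmod, show xs.length % 2 = 0 by omega]
      norm_num
    rw [if_neg hA, if_neg hB]
    have hp : xs.length = 2 * (xs.length / 2) := by omega
    have hdiv : PySem.Int.floordiv (xs.length : Int) 2 = ((xs.length / 2 : Nat) : Int) := by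
      rw [PySem.Int.floordiv_eq_ediv_of_pos (by norm_num)]; omega
    rw [hdiv]
    have h1 : ((1 : Nat) : Int) = (1 : Int) := by norm_num
    have := pvRangeFold xs (xs.length / 2) hp (xs.length / 2) 1 1 (by omega) (by omega)
    rw [h1] at this
    rw [this]
    simp [List.drop_one]

-- ===== VERDICT (by name: the statement is the Claim_ definition above) =====
theorem numberOfWays_spec : Claim_equal_numberOfWays := by
  intro corridor _
  exact numberOfWays_agree corridor
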